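-- pv_equiv track=rewrite | github.com/Languisher/CPGE-Notes | Y2023-1/Graphe/Codes/TP1.py | matrice_kneser
-- ===== SOURCE A (Python) =====
-- def parties(n,k):
--     if k==1:
--         return [[i] for i in range(1,n+1)]
--     else:
--         L=[]
--         Lprecedent=parties(n,k-1)
--         for partie in Lprecedent:
--             for i in range(partie[k-2]+1,n+1):
--                 L.append(partie+[i])
--         return L
--
-- def est_disjoint(partie1,partie2):
--     for i in partie1:
--         if i in partie2:
--             return False
--     return True
--
-- def matrice_kneser(n,k):
--     sommets=parties(n,k)
--     ordre=len(sommets)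
--     M=[[0 for j in range(ordre)] for i in range(ordre)]
--     for i in range(ordre):
--         for j in range(ordre):
--             if est_disjoint(sommets[i],sommets[j]):
--                 M[i][j]=1
--     return M
-- ===== SOURCE B (Python) =====
-- def matrice_kneser(n, k):
--     # Generate the k-subsets of {1..n} directly with a forward accumulator
--     # recursion, then build each matrix row in one comprehension (no zero
--     # matrix + in-place mutation pass).
--     verts = []
--
--     def build(start, remaining, chosen):
--         if remaining == 0:
--             verts.append(chosen)
--         else:
--             for i in range(start, n + 1):
--                 build(i + 1, remaining - 1, chosen + [i])
--
--     build(1, k, [])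
--     return [[1 if all(x not in b for x in a) else 0 for b in verts]
--             for a in verts]
-- ===== Notes on version B (the rewrite author's own statement) =====
-- stated objective: alternative
-- what changed: B generates the k-subsets with a single forward accumulator recursion (instead of A's layer-by-layer rebuild extending every (k-1)-subset) and produces each matrix row directly by a comprehension instead of allocating a zero matrix and mutating entries in a second pass.
-- outside the precondition, e.g. on matrice_kneser(2, 950): A returns [], B returns []
import Mathlib
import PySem

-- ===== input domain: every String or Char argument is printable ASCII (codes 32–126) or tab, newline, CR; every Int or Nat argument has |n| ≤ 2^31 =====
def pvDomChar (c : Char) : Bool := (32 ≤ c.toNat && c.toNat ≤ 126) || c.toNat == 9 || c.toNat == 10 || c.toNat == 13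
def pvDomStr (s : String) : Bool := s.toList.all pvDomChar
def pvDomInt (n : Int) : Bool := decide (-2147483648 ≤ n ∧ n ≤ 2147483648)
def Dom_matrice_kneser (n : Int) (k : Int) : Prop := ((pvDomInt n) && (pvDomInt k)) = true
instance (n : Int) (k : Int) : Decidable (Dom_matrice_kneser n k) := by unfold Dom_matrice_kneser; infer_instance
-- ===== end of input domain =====

-- B replaces A's layer-by-layer subset rebuilding and zero-matrix mutation pass by a forward
-- accumulator recursion generating the k-subsets plus a direct row-by-row comprehension (objective: alternative).

-- ===== PORT A =====
-- est_disjoint: loop with early return False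
def estDisjoint : List Int → List Int → Bool
  | [], _ => true
  | i :: rest, p2 => if p2.contains i then false else estDisjoint rest p2

-- parties(n,k): recursion on k; ported on k.toNat (Pre_ gives k ≥ 1; for k ≤ 0 Python diverges,
-- so the value at 0 is never the claimed one). partie[k-2] is partie.getD (k-2) [] with default 0:
-- the index is always in range (elements of parties(n,k-1) have length k-1).
def partiesGo (n : Int) : Nat → List (List Int)
  | 0 => []
  | 1 => (PySem.List.pyRange 1 (n+1) 1).map (fun i => [i])
  | m+2 =>
      (partiesGo n (m+1)).foldl
        (fun L partie =>
          L ++ (PySem.List.pyRange (partie.getD m 0 + 1) (n+1) 1).map (fun i => partie ++ [i]))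
        []

def matrice_kneser (n : Int) (k : Int) : List (List Int) :=
  let sommets := partiesGo n k.toNat
  let ordre := sommets.length
  let M0 := (List.range ordre).map (fun _ => (List.range ordre).map (fun _ => (0:Int)))
  (List.range ordre).foldl
    (fun M i =>
      (List.range ordre).foldl
        (fun M j =>
          if estDisjoint (sommets.getD i []) (sommets.getD j []) then
            M.set i ((M.getD i []).set j 1)
          else M)
        M)
    M0

-- ===== PORT B =====
-- build(start, remaining, chosen): forward accumulator recursion; remaining is a Nat fuel that is
-- exactly Python's 'remaining' counter for k ≥ 1 (Pre_).
def buildVerts (n : Int) : Nat → Int → List Int → List (List Int)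
  | 0, _, chosen => [chosen]
  | r+1, start, chosen =>
      (PySem.List.pyRange start (n+1) 1).flatMap (fun i => buildVerts n r (i+1) (chosen ++ [i]))

def matrice_kneser_alt (n : Int) (k : Int) : List (List Int) :=
  let verts := buildVerts n k.toNat 1 []
  verts.map (fun a => verts.map (fun b => if a.all (fun x => !b.contains x) then (1:Int) else 0))

-- ===== PRECONDITION & SPEC =====
-- Pre_ excludes k ≤ 0, on which Python A never returns (parties recurses past its base case and
-- raises RecursionError), and k > 900, where parties' recursion depth k reaches CPython's
-- recursion limit and A raises RecursionError; the exact cutoff is interpreter-dependent, so the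
-- bound is conservative and also excludes a band of large k (k > n) on which A still returns [].
def Pre_matrice_kneser (n : Int) (k : Int) : Prop := 1 ≤ k ∧ k ≤ 900
instance (n : Int) (k : Int) : Decidable (Pre_matrice_kneser n k) := by unfold Pre_matrice_kneser; infer_instance
def pvWitness_matrice_kneser : Int × Int := (3, 2)

def Spec_matrice_kneser (n : Int) (k : Int) (out : List (List Int)) : Prop := out = matrice_kneser_alt n k
instance (n : Int) (k : Int) (out : List (List Int)) : Decidable (Spec_matrice_kneser n k out) := by unfold Spec_matrice_kneser; infer_instance

-- ===== CLAIM (what is proved, stated in full; the proofs are below) =====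
def Claim_equal_matrice_kneser : Prop := ∀ (n : Int) (k : Int), Dom_matrice_kneser n k → Pre_matrice_kneser n k → Spec_matrice_kneser n k (matrice_kneser n k)

-- ===== LEMMAS AND PROOFS =====

-- canonical lexicographic generator of the l-subsets of {start..n} (proof-only helper)
def combs (n : Int) : Nat → Int → List (List Int)
  | 0, _ => [[]]
  | l+1, start =>
      (PySem.List.pyRange start (n+1) 1).flatMap (fun i => (combs n l (i+1)).map (fun q => i :: q))

theorem estDisjoint_eq_all (a b : List Int) :
    estDisjoint a b = a.all (fun x => !b.contains x) := by
  induction a with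
  | nil => rfl
  | cons i r ih => cases hb : b.contains i <;> simp [estDisjoint, hb, ih]

theorem buildVerts_eq (n : Int) :
    ∀ (l : Nat) (start : Int) (chosen : List Int),
      buildVerts n l start chosen = (combs n l start).map (fun q => chosen ++ q) := by
  intro l
  induction l with
  | zero => intro start chosen; simp [buildVerts, combs]
  | succ r ih =>
    intro start chosen
    have h : ∀ i : Int, buildVerts n r (i+1) (chosen ++ [i])
        = (combs n r (i+1)).map (fun q => chosen ++ i :: q) := by
      intro i; rw [ih]; simp [List.append_assoc]
    simp only [buildVerts, combs, List.map_flatMap, List.map_map, h]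
    rfl

theorem flatMap_singleton_list (l : List Int) :
    l.flatMap (fun i => ([[i]] : List (List Int))) = l.map (fun i => [i]) := by
  induction l <;> simp [*]

theorem combs_extend (n : Int) :
    ∀ (l : Nat) (start : Int),
      (combs n (l+1) start).flatMap
          (fun p => (PySem.List.pyRange (p.getD l 0 + 1) (n+1) 1).map (fun i => p ++ [i]))
        = combs n (l+2) start := by
  intro l
  induction l with
  | zero =>
    intro start
    simp [combs, List.flatMap_map, List.map_map, flatMap_singleton_list]
    rfl
  | succ l ih =>
    intro start
    have h : ∀ i : Int,
        ((combs n (l+1) (i+1)).map (fun q => i :: q)).flatMap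
            (fun p => (PySem.List.pyRange (p.getD (l+1) 0 + 1) (n+1) 1).map (fun j => p ++ [j]))
          = (combs n (l+2) (i+1)).map (fun q => i :: q) := by
      intro i
      rw [List.flatMap_map, ← ih (i+1), List.map_flatMap]
      simp only [List.map_map]
      rfl
    show ((PySem.List.pyRange start (n+1) 1).flatMap
        (fun i => (combs n (l+1) (i+1)).map (fun q => i :: q))).flatMap _ = _
    rw [List.flatMap_assoc]
    simp only [h]
    rfl

theorem partiesGo_eq (n : Int) : ∀ m : Nat, partiesGo n (m+1) = combs n (m+1) 1 := by
  intro m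
  induction m with
  | zero => simp [partiesGo, combs, flatMap_singleton_list]
  | succ m ih =>
    show partiesGo n (m+2) = combs n (m+2) 1
    rw [partiesGo, ← List.flatMap_eq_foldl, ih]
    exact combs_extend n m 1

theorem inner_set (g : Nat → Bool) (i : Nat) :
    ∀ (js : List Nat) (M : List (List Int)), i < M.length →
      js.foldl (fun M j => if g j then M.set i ((M.getD i []).set j 1) else M) M
        = M.set i (js.foldl (fun r j => if g j then r.set j 1 else r) (M.getD i [])) := by
  intro js
  induction js with
  | nil =>
    intro M hM
    rw [List.foldl_nil, List.foldl_nil, List.getD_eq_getElem _ _ hM, List.set_getElem_self]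
  | cons j js ih =>
    intro M hM
    simp only [List.foldl_cons]
    cases hg : g j
    · simp only [Bool.false_eq_true, if_false]
      exact ih M hM
    · simp only [if_true]
      rw [ih _ (by simpa using hM)]
      rw [List.set_set, List.getD_eq_getElem _ _ (by simpa using hM), List.getElem_set_self]

theorem row_fold (g : Nat → Bool) (ordre : Nat) :
    ∀ m, m ≤ ordre →
      (List.range m).foldl (fun r j => if g j then r.set j 1 else r) (List.replicate ordre (0:Int))
        = (List.range m).map (fun j => if g j then (1:Int) else 0)
          ++ List.replicate (ordre - m) (0:Int) := by
  intro m
  induction m with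
  | zero => intro _; simp
  | succ m ih =>
    intro h
    have hm : m ≤ ordre := Nat.le_of_succ_le h
    have hrep : ordre - m = (ordre - (m+1)) + 1 := by omega
    rw [List.range_succ, List.foldl_append, ih hm, List.foldl_cons, List.foldl_nil,
        List.map_append, List.append_assoc]
    cases hg : g m
    · simp only [Bool.false_eq_true, if_false]
      rw [hrep, List.replicate_succ]
      simp [hg]
    · simp only [if_true]
      rw [List.set_append, hrep, List.replicate_succ]
      simp [hg]

theorem outer_fold (f : Nat → Nat → Bool) (ordre : Nat) :
    ∀ m, m ≤ ordre →
      (List.range m).foldl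
          (fun M i =>
            (List.range ordre).foldl
              (fun M j => if f i j then M.set i ((M.getD i []).set j 1) else M) M)
          (List.replicate ordre (List.replicate ordre (0:Int)))
        = (List.range m).map (fun i => (List.range ordre).map (fun j => if f i j then (1:Int) else 0))
          ++ List.replicate (ordre - m) (List.replicate ordre (0:Int)) := by
  intro m
  induction m with
  | zero => intro _; simp
  | succ m ih =>
    intro h
    have hm : m ≤ ordre := Nat.le_of_succ_le h
    have hrep : ordre - m = (ordre - (m+1)) + 1 := by omega
    rw [List.range_succ, List.foldl_append, ih hm, List.foldl_cons, List.foldl_nil]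
    have hlenP : ((List.range m).map
        (fun i => (List.range ordre).map (fun j => if f i j then (1:Int) else 0))).length = m := by
      simp
    have hlen : (((List.range m).map
        (fun i => (List.range ordre).map (fun j => if f i j then (1:Int) else 0)))
        ++ List.replicate (ordre - m) (List.replicate ordre (0:Int))).length = ordre := by
      simp; omega
    rw [inner_set _ _ _ _ (by rw [hlen]; omega)]
    have hgetD : (((List.range m).map
        (fun i => (List.range ordre).map (fun j => if f i j then (1:Int) else 0)))
        ++ List.replicate (ordre - m) (List.replicate ordre (0:Int))).getD m []
        = List.replicate ordre (0:Int) := by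
      rw [List.getD_append_right _ _ _ _ (by rw [hlenP]), hlenP, Nat.sub_self, hrep,
          List.replicate_succ]
      rfl
    rw [hgetD, row_fold _ _ _ le_rfl, Nat.sub_self, List.replicate_zero, List.append_nil,
        List.set_append, hrep, List.replicate_succ]
    rw [List.map_append, List.append_assoc]
    simp [hlenP]

theorem map_map_range_getD (s : List (List Int)) (g : List Int → List Int → Int) :
    (List.range s.length).map
        (fun i => (List.range s.length).map (fun j => g (s.getD i []) (s.getD j [])))
      = s.map (fun a => s.map (fun b => g a b)) := by
  refine List.ext_getElem (by simp) ?_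
  intro i h1 h2
  have hi : i < s.length := by simpa using h1
  simp only [List.getElem_map, List.getElem_range]
  refine List.ext_getElem (by simp) ?_
  intro j hh1 hh2
  have hj : j < s.length := by simpa using hh1
  simp only [List.getElem_map, List.getElem_range]
  rw [List.getD_eq_getElem _ _ hi, List.getD_eq_getElem _ _ hj]

theorem matrice_direct (n k : Int) :
    matrice_kneser n k
      = (partiesGo n k.toNat).map
          (fun a => (partiesGo n k.toNat).map (fun b => if estDisjoint a b then (1:Int) else 0)) := by
  show (List.range (partiesGo n k.toNat).length).foldl _ _ = _
  rw [show ((List.range (partiesGo n k.toNat).length).map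
        (fun _ => (List.range (partiesGo n k.toNat).length).map (fun _ => (0:Int))))
      = List.replicate (partiesGo n k.toNat).length
          (List.replicate (partiesGo n k.toNat).length (0:Int)) by
    simp [List.map_const']]
  rw [outer_fold (fun i j => estDisjoint ((partiesGo n k.toNat).getD i [])
        ((partiesGo n k.toNat).getD j [])) _ _ le_rfl, Nat.sub_self, List.replicate_zero,
      List.append_nil]
  exact map_map_range_getD (partiesGo n k.toNat)
    (fun a b => if estDisjoint a b then (1:Int) else 0)

-- ===== VERDICT (by name: the statement is the Claim_ definition above) =====
theorem matrice_kneser_spec : Claim_equal_matrice_kneser := by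
  intro n k _ hpre
  unfold Spec_matrice_kneser matrice_kneser_alt
  have hk : ∃ m : Nat, k.toNat = m + 1 := ⟨k.toNat - 1, by
    unfold Pre_matrice_kneser at hpre; omega⟩
  obtain ⟨m, hm⟩ := hk
  have hs : partiesGo n k.toNat = combs n k.toNat 1 := by rw [hm]; exact partiesGo_eq n m
  rw [matrice_direct, hs, buildVerts_eq]
  simp [estDisjoint_eq_all]
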